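-- pv_equiv track=rewrite | github.com/ArcProjet/ARC | primitive.py | growingColor4
-- ===== SOURCE A (Python) =====
-- def gridCopy(grid):
--     res = [[0 for _ in range(len(grid[0]))] for _ in range(len(grid))]
--     for i in range(0, len(grid)):
--         for j in range(0, len(grid[i])):
--             res[i][j] = grid[i][j]
--     return res
--
-- def growingColor4(grid):
--     res = gridCopy(grid)
--     for i in range(1, len(grid)):
--         for j in range(len(grid[0])):
--             if (grid[i][j] == 4):
--                 res[i - 1][j] = 4
--     for k in range(0, len(grid)):
--         for l in range(len(grid[0]) - 2, -1, -1):
--             if (grid[k][l] == 4):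
--                 res[k][l + 1] = 4
--     for m in range(len(grid) - 2, -1, -1):
--         for n in range(len(grid[0])):
--             if (grid[m][n] == 4):
--                 res[m + 1][n] = 4
--     for o in range(len(grid)):
--         for p in range(1, len(grid[0])):
--             if (grid[o][p] == 4):
--                 res[o][p - 1] = 4
--     return res
-- ===== SOURCE B (Python) =====
-- def growingColor4(grid):
--     h = len(grid)
--     w = len(grid[0]) if grid else 0
--     def lit(i, j):
--         return grid[i][j] == 4 or any(
--             0 <= a < h and 0 <= b < w and grid[a][b] == 4
--             for a, b in ((i - 1, j), (i + 1, j), (i, j - 1), (i, j + 1)))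
--     return [[4 if lit(i, j) else grid[i][j] for j in range(w)] for i in range(h)]
-- ===== Notes on version B (the rewrite author's own statement) =====
-- stated objective: simpler
-- what changed: A mutates a copied grid with four separate directional scatter passes (one per neighbor direction, two of them iterating backwards); B builds the result in a single pointwise gather pass: each output cell is 4 iff the cell or any in-bounds 4-neighbor holds 4 in the input, else the input value.
import Mathlib
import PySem

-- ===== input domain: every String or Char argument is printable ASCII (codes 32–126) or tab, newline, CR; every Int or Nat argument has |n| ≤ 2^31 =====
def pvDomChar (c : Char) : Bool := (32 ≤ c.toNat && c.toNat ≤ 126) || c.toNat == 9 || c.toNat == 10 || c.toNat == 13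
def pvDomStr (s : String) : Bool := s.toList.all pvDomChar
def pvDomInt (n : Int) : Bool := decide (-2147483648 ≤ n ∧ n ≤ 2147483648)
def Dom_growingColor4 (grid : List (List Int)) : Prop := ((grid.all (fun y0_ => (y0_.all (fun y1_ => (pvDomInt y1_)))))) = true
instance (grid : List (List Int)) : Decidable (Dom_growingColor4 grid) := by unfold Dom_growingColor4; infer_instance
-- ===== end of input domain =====

-- B replaces A's four directional mutate-in-place scatter passes by a single pointwise
-- gather (each output cell looks at its own 4-neighborhood in the input); simpler, same cost.

-- ===== PORT A =====
-- shared cell accessors modelling Python's res[i][j] reads/writes (indices here are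
-- always in range under Pre_, where Python does not raise)
def getCell (g : List (List Int)) (i j : Nat) : Int := (g.getD i []).getD j 0
def setCell (g : List (List Int)) (i j : Nat) (v : Int) : List (List Int) :=
  g.set i ((g.getD i []).set j v)

def gridCopy (grid : List (List Int)) : List (List Int) :=
  -- res = [[0]*len(grid[0]) for _ in range(len(grid))] (grid[0] unevaluated when grid=[])
  let res := (List.range grid.length).map
      (fun _ => (List.range (grid.headD []).length).map (fun _ => (0 : Int)))
  (List.range grid.length).foldl (fun res i =>
    (List.range (grid.getD i []).length).foldl (fun res j =>
      setCell res i j (getCell grid i j)) res) res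

def growingColor4 (grid : List (List Int)) : List (List Int) :=
  let h := grid.length
  let w := (grid.headD []).length
  let res := gridCopy grid
  -- for i in range(1, h): for j in range(w): if grid[i][j]==4: res[i-1][j]=4
  let res := (List.range' 1 (h - 1)).foldl (fun res i =>
    (List.range w).foldl (fun res j =>
      if getCell grid i j = 4 then setCell res (i - 1) j 4 else res) res) res
  -- for k in range(h): for l in range(w-2, -1, -1): if grid[k][l]==4: res[k][l+1]=4
  let res := (List.range h).foldl (fun res k =>
    ((List.range (w - 1)).reverse).foldl (fun res l =>
      if getCell grid k l = 4 then setCell res k (l + 1) 4 else res) res) res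
  -- for m in range(h-2, -1, -1): for n in range(w): if grid[m][n]==4: res[m+1][n]=4
  let res := ((List.range (h - 1)).reverse).foldl (fun res m =>
    (List.range w).foldl (fun res n =>
      if getCell grid m n = 4 then setCell res (m + 1) n 4 else res) res) res
  -- for o in range(h): for p in range(1, w): if grid[o][p]==4: res[o][p-1]=4
  (List.range h).foldl (fun res o =>
    (List.range' 1 (w - 1)).foldl (fun res p =>
      if getCell grid o p = 4 then setCell res o (p - 1) 4 else res) res) res

-- ===== PORT B =====
def litB (grid : List (List Int)) (h w : Nat) (i j : Nat) : Bool :=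
  getCell grid i j == 4 ||
  ([((i : Int) - 1, (j : Int)), ((i : Int) + 1, (j : Int)),
    ((i : Int), (j : Int) - 1), ((i : Int), (j : Int) + 1)].any
    (fun ab => decide (0 ≤ ab.1) && decide (ab.1 < (h : Int)) &&
               decide (0 ≤ ab.2) && decide (ab.2 < (w : Int)) &&
               getCell grid ab.1.toNat ab.2.toNat == 4))

def growingColor4_alt (grid : List (List Int)) : List (List Int) :=
  let h := grid.length
  let w := (grid.headD []).length   -- len(grid[0]) if grid else 0
  (List.range h).map (fun i => (List.range w).map (fun j =>
    if litB grid h w i j then 4 else getCell grid i j))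

-- ===== PRECONDITION & SPEC =====
-- Pre_ excludes exactly the ragged grids (some row's length differs from row 0's), on
-- which Python A raises IndexError; A returns normally on every rectangular grid.
def Pre_growingColor4 (grid : List (List Int)) : Prop :=
  ∀ row ∈ grid, row.length = (grid.headD []).length
instance (grid : List (List Int)) : Decidable (Pre_growingColor4 grid) := by
  unfold Pre_growingColor4; infer_instance
def pvWitness_growingColor4 : List (List Int) := [[0, 4], [1, 0]]
def Spec_growingColor4 (grid : List (List Int)) (out : List (List Int)) : Prop := out = growingColor4_alt grid
instance (grid : List (List Int)) (out : List (List Int)) : Decidable (Spec_growingColor4 grid out) := by unfold Spec_growingColor4; infer_instance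

-- ===== CLAIM (what is proved, stated in full; the proofs are below) =====
def Claim_equal_growingColor4 : Prop := ∀ (grid : List (List Int)), Dom_growingColor4 grid → Pre_growingColor4 grid → Spec_growingColor4 grid (growingColor4 grid)

-- ===== LEMMAS AND PROOFS =====

theorem getD_set' {α : Type} (g : List α) (i : Nat) (r d : α) (i' : Nat) :
    (g.set i r).getD i' d = if i = i' ∧ i < g.length then r else g.getD i' d := by
  simp only [List.getD_eq_getElem?_getD, List.getElem?_set]
  split_ifs with h1 h2 h3 h3 <;> simp_all <;> omega

theorem length_setCell (g : List (List Int)) (i j : Nat) (v : Int) :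
    (setCell g i j v).length = g.length := by
  simp [setCell]

theorem rowlen_setCell (g : List (List Int)) (i j : Nat) (v : Int) (i' : Nat) :
    ((setCell g i j v).getD i' []).length = (g.getD i' []).length := by
  unfold setCell
  rw [getD_set']
  split_ifs with h
  · rw [← h.1, List.length_set]
  · rfl

theorem getCell_setCell (g : List (List Int)) (i j : Nat) (v : Int) (i' j' : Nat) :
    getCell (setCell g i j v) i' j' =
      if i = i' ∧ j = j' ∧ i < g.length ∧ j < (g.getD i []).length then v
      else getCell g i' j' := by
  unfold getCell setCell
  rw [getD_set']
  by_cases h1 : i = i' ∧ i < g.length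
  · obtain ⟨hii, hlen⟩ := h1; subst hii
    rw [if_pos ⟨rfl, hlen⟩, getD_set']
    by_cases h2 : j = j' ∧ j < (g.getD i []).length
    · rw [if_pos h2, if_pos ⟨rfl, h2.1, hlen, h2.2⟩]
    · rw [if_neg h2, if_neg (by tauto)]
  · rw [if_neg h1, if_neg (by tauto)]

-- flatten a nested double loop into one fold over the index-pair list
theorem foldl_nested' {γ : Type} (L1 : List Nat) (L2 : Nat → List Nat)
    (g : γ → Nat → Nat → γ) (init : γ) :
    L1.foldl (fun acc x => (L2 x).foldl (fun acc y => g acc x y) acc) init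
      = (L1.flatMap (fun x => (L2 x).map (fun y => (x, y)))).foldl
          (fun acc p => g acc p.1 p.2) init := by
  induction L1 generalizing init with
  | nil => rfl
  | cons a l ih => simp [List.foldl_append, List.foldl_map, ih]

-- the scatter step of A's four dilation passes, with target map t
def wstep (grid : List (List Int)) (t : Nat → Nat → Nat × Nat)
    (r : List (List Int)) (p : Nat × Nat) : List (List Int) :=
  if getCell grid p.1 p.2 = 4 then setCell r (t p.1 p.2).1 (t p.1 p.2).2 4 else r

theorem writes_length (grid : List (List Int)) (t : Nat → Nat → Nat × Nat)
    (ps : List (Nat × Nat)) (r : List (List Int)) :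
    (ps.foldl (wstep grid t) r).length = r.length := by
  induction ps generalizing r with
  | nil => rfl
  | cons p l ih =>
      rw [List.foldl_cons, ih]
      unfold wstep
      split_ifs
      · rw [length_setCell]
      · rfl

theorem writes_rowlen (grid : List (List Int)) (t : Nat → Nat → Nat × Nat)
    (ps : List (Nat × Nat)) (r : List (List Int)) (i : Nat) :
    ((ps.foldl (wstep grid t) r).getD i []).length = (r.getD i []).length := by
  induction ps generalizing r with
  | nil => rfl
  | cons p l ih =>
      rw [List.foldl_cons, ih]
      unfold wstep
      split_ifs
      · rw [rowlen_setCell]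
      · rfl

theorem getCell_writes (grid : List (List Int)) (t : Nat → Nat → Nat × Nat)
    (ps : List (Nat × Nat)) (r : List (List Int)) (i j : Nat)
    (hi : i < r.length) (hj : j < (r.getD i []).length) :
    getCell (ps.foldl (wstep grid t) r) i j =
      if ∃ p ∈ ps, getCell grid p.1 p.2 = 4 ∧ t p.1 p.2 = (i, j) then 4
      else getCell r i j := by
  induction ps generalizing r with
  | nil => simp
  | cons p l ih =>
      have hi' : i < (wstep grid t r p).length := by
        unfold wstep; split_ifs
        · rw [length_setCell]; exact hi
        · exact hi
      have hj' : j < ((wstep grid t r p).getD i []).length := by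
        unfold wstep; split_ifs
        · rw [rowlen_setCell]; exact hj
        · exact hj
      rw [List.foldl_cons, ih _ hi' hj']
      by_cases hl : ∃ q ∈ l, getCell grid q.1 q.2 = 4 ∧ t q.1 q.2 = (i, j)
      · have hcons : ∃ q ∈ p :: l, getCell grid q.1 q.2 = 4 ∧ t q.1 q.2 = (i, j) := by
          obtain ⟨q, hq, h⟩ := hl; exact ⟨q, List.mem_cons_of_mem _ hq, h⟩
        rw [if_pos hl, if_pos hcons]
      · rw [if_neg hl]
        unfold wstep
        by_cases hc : getCell grid p.1 p.2 = 4
        · rw [if_pos hc, getCell_setCell]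
          by_cases hp : t p.1 p.2 = (i, j)
          · have h1 : (t p.1 p.2).1 = i := by rw [hp]
            have h2 : (t p.1 p.2).2 = j := by rw [hp]
            have hcond : (t p.1 p.2).1 = i ∧ (t p.1 p.2).2 = j ∧
                (t p.1 p.2).1 < r.length ∧
                (t p.1 p.2).2 < (r.getD (t p.1 p.2).1 []).length :=
              ⟨h1, h2, by rw [h1]; exact hi, by rw [h1, h2]; exact hj⟩
            have hcons : ∃ q ∈ p :: l, getCell grid q.1 q.2 = 4 ∧ t q.1 q.2 = (i, j) :=
              ⟨p, List.mem_cons_self, hc, hp⟩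
            rw [if_pos hcond, if_pos hcons]
          · have hne : ¬((t p.1 p.2).1 = i ∧ (t p.1 p.2).2 = j ∧
                (t p.1 p.2).1 < r.length ∧
                (t p.1 p.2).2 < (r.getD (t p.1 p.2).1 []).length) := by
              intro h; exact hp (Prod.ext h.1 h.2.1)
            have hnc : ¬∃ q ∈ p :: l, getCell grid q.1 q.2 = 4 ∧ t q.1 q.2 = (i, j) := by
              rintro ⟨q, hq, h4, hqt⟩
              rcases List.mem_cons.mp hq with h | h
              · exact hp (h ▸ hqt)
              · exact hl ⟨q, h, h4, hqt⟩
            rw [if_neg hne, if_neg hnc]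
        · rw [if_neg hc]
          have hnc : ¬∃ q ∈ p :: l, getCell grid q.1 q.2 = 4 ∧ t q.1 q.2 = (i, j) := by
            rintro ⟨q, hq, h4, hqt⟩
            rcases List.mem_cons.mp hq with h | h
            · exact hc (h ▸ h4)
            · exact hl ⟨q, h, h4, hqt⟩
          rw [if_neg hnc]

-- the copy step of gridCopy (writes getCell grid p at position p)
def cstep (grid : List (List Int)) (r : List (List Int)) (p : Nat × Nat) :
    List (List Int) := setCell r p.1 p.2 (getCell grid p.1 p.2)

theorem copies_length (grid : List (List Int)) (ps : List (Nat × Nat))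
    (r : List (List Int)) : (ps.foldl (cstep grid) r).length = r.length := by
  induction ps generalizing r with
  | nil => rfl
  | cons p l ih => rw [List.foldl_cons, ih]; unfold cstep; rw [length_setCell]

theorem copies_rowlen (grid : List (List Int)) (ps : List (Nat × Nat))
    (r : List (List Int)) (i : Nat) :
    ((ps.foldl (cstep grid) r).getD i []).length = (r.getD i []).length := by
  induction ps generalizing r with
  | nil => rfl
  | cons p l ih => rw [List.foldl_cons, ih]; unfold cstep; rw [rowlen_setCell]

theorem getCell_copies (grid : List (List Int)) (ps : List (Nat × Nat))
    (r : List (List Int)) (i j : Nat)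
    (hi : i < r.length) (hj : j < (r.getD i []).length) :
    getCell (ps.foldl (cstep grid) r) i j =
      if (i, j) ∈ ps then getCell grid i j else getCell r i j := by
  induction ps generalizing r with
  | nil => simp
  | cons p l ih =>
      have hi' : i < (cstep grid r p).length := by
        unfold cstep; rw [length_setCell]; exact hi
      have hj' : j < ((cstep grid r p).getD i []).length := by
        unfold cstep; rw [rowlen_setCell]; exact hj
      rw [List.foldl_cons, ih _ hi' hj']
      by_cases hl : (i, j) ∈ l
      · rw [if_pos hl, if_pos (List.mem_cons_of_mem _ hl)]
      · rw [if_neg hl]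
        unfold cstep
        rw [getCell_setCell]
        by_cases hp : p = (i, j)
        · have h1 : p.1 = i := by rw [hp]
          have h2 : p.2 = j := by rw [hp]
          have hcond : p.1 = i ∧ p.2 = j ∧ p.1 < r.length ∧
              p.2 < (r.getD p.1 []).length :=
            ⟨h1, h2, by rw [h1]; exact hi, by rw [h1, h2]; exact hj⟩
          rw [if_pos hcond, if_pos (hp ▸ List.mem_cons_self), h1, h2]
        · have hne : ¬(p.1 = i ∧ p.2 = j ∧ p.1 < r.length ∧
              p.2 < (r.getD p.1 []).length) := by
            intro h; exact hp (Prod.ext h.1 h.2.1)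
          have hnc : (i, j) ∉ p :: l := by
            intro h; rcases List.mem_cons.mp h with h | h
            · exact hp h.symm
            · exact hl h
          rw [if_neg hne, if_neg hnc]

def pairs (L1 L2 : List Nat) : List (Nat × Nat) :=
  L1.flatMap (fun x => L2.map (fun y => (x, y)))

def pairsD (L1 : List Nat) (L2 : Nat → List Nat) : List (Nat × Nat) :=
  L1.flatMap (fun x => (L2 x).map (fun y => (x, y)))

def res0 (grid : List (List Int)) : List (List Int) :=
  (List.range grid.length).map
    (fun _ => (List.range (grid.headD []).length).map (fun _ => (0 : Int)))

-- the four pipeline stages of flatA, named for the proofs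
def gA0 (grid : List (List Int)) : List (List Int) :=
  (pairsD (List.range grid.length) (fun i => List.range (grid.getD i []).length)).foldl
    (cstep grid) (res0 grid)

def gA1 (grid : List (List Int)) : List (List Int) :=
  (pairs (List.range' 1 (grid.length - 1)) (List.range (grid.headD []).length)).foldl
    (wstep grid (fun x y => (x - 1, y))) (gA0 grid)

def gA2 (grid : List (List Int)) : List (List Int) :=
  (pairs (List.range grid.length) ((List.range ((grid.headD []).length - 1)).reverse)).foldl
    (wstep grid (fun x y => (x, y + 1))) (gA1 grid)

def gA3 (grid : List (List Int)) : List (List Int) :=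
  (pairs ((List.range (grid.length - 1)).reverse) (List.range (grid.headD []).length)).foldl
    (wstep grid (fun x y => (x + 1, y))) (gA2 grid)

def flatA (grid : List (List Int)) : List (List Int) :=
  (pairs (List.range grid.length) (List.range' 1 ((grid.headD []).length - 1))).foldl
    (wstep grid (fun x y => (x, y - 1))) (gA3 grid)

theorem copy_flat (grid : List (List Int)) (L1 : List Nat) (L2 : Nat → List Nat)
    (r : List (List Int)) :
    L1.foldl (fun res i => (L2 i).foldl (fun res j =>
        setCell res i j (getCell grid i j)) res) r
      = (pairsD L1 L2).foldl (cstep grid) r :=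
  foldl_nested' L1 L2 (fun acc x y => cstep grid acc (x, y)) r

theorem pass1_flat (grid : List (List Int)) (L1 L2 : List Nat) (r : List (List Int)) :
    L1.foldl (fun res i => L2.foldl (fun res j =>
        if getCell grid i j = 4 then setCell res (i - 1) j 4 else res) res) r
      = (pairs L1 L2).foldl (wstep grid (fun x y => (x - 1, y))) r :=
  foldl_nested' L1 (fun _ => L2) (fun acc x y => wstep grid (fun x y => (x - 1, y)) acc (x, y)) r

theorem pass2_flat (grid : List (List Int)) (L1 L2 : List Nat) (r : List (List Int)) :
    L1.foldl (fun res i => L2.foldl (fun res j =>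
        if getCell grid i j = 4 then setCell res i (j + 1) 4 else res) res) r
      = (pairs L1 L2).foldl (wstep grid (fun x y => (x, y + 1))) r :=
  foldl_nested' L1 (fun _ => L2) (fun acc x y => wstep grid (fun x y => (x, y + 1)) acc (x, y)) r

theorem pass3_flat (grid : List (List Int)) (L1 L2 : List Nat) (r : List (List Int)) :
    L1.foldl (fun res i => L2.foldl (fun res j =>
        if getCell grid i j = 4 then setCell res (i + 1) j 4 else res) res) r
      = (pairs L1 L2).foldl (wstep grid (fun x y => (x + 1, y))) r :=
  foldl_nested' L1 (fun _ => L2) (fun acc x y => wstep grid (fun x y => (x + 1, y)) acc (x, y)) r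

theorem pass4_flat (grid : List (List Int)) (L1 L2 : List Nat) (r : List (List Int)) :
    L1.foldl (fun res i => L2.foldl (fun res j =>
        if getCell grid i j = 4 then setCell res i (j - 1) 4 else res) res) r
      = (pairs L1 L2).foldl (wstep grid (fun x y => (x, y - 1))) r :=
  foldl_nested' L1 (fun _ => L2) (fun acc x y => wstep grid (fun x y => (x, y - 1)) acc (x, y)) r

theorem A_flat (grid : List (List Int)) : growingColor4 grid = flatA grid := by
  simp only [growingColor4, gridCopy, flatA, gA3, gA2, gA1, gA0, res0]
  rw [copy_flat, pass1_flat, pass2_flat, pass3_flat, pass4_flat]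

theorem mem_pairs (L1 L2 : List Nat) (p : Nat × Nat) :
    p ∈ pairs L1 L2 ↔ p.1 ∈ L1 ∧ p.2 ∈ L2 := by
  cases p with
  | mk a b => simp [pairs]

theorem mem_pairsD (L1 : List Nat) (L2 : Nat → List Nat) (p : Nat × Nat) :
    p ∈ pairsD L1 L2 ↔ p.1 ∈ L1 ∧ p.2 ∈ L2 p.1 := by
  cases p with
  | mk a b =>
      simp only [pairsD, List.mem_flatMap, List.mem_map, Prod.mk.injEq]
      constructor
      · rintro ⟨x, hx, y, hy, h1, h2⟩; subst h1; subst h2; exact ⟨hx, hy⟩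
      · rintro ⟨h1, h2⟩; exact ⟨a, h1, b, h2, rfl, rfl⟩

-- shape of res0 and of the whole flattened pipeline
theorem length_res0 (grid : List (List Int)) : (res0 grid).length = grid.length := by
  simp [res0]

theorem rowlen_res0 (grid : List (List Int)) (i : Nat) (hi : i < grid.length) :
    ((res0 grid).getD i []).length = (grid.headD []).length := by
  rw [List.getD_eq_getElem (res0 grid) [] (by simpa [length_res0] using hi)]
  simp [res0]

-- row lengths of a rectangular grid
theorem rowlen_rect (grid : List (List Int)) (hPre : Pre_growingColor4 grid)
    (i : Nat) (hi : i < grid.length) :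
    (grid.getD i []).length = (grid.headD []).length := by
  rw [List.getD_eq_getElem grid [] hi]
  exact hPre grid[i] (List.getElem_mem hi)

theorem length_gA0 (grid : List (List Int)) : (gA0 grid).length = grid.length := by
  unfold gA0; rw [copies_length, length_res0]
theorem rowlen_gA0 (grid : List (List Int)) (i : Nat) (hi : i < grid.length) :
    ((gA0 grid).getD i []).length = (grid.headD []).length := by
  unfold gA0; rw [copies_rowlen, rowlen_res0 grid i hi]
theorem length_gA1 (grid : List (List Int)) : (gA1 grid).length = grid.length := by
  unfold gA1; rw [writes_length, length_gA0]
theorem rowlen_gA1 (grid : List (List Int)) (i : Nat) (hi : i < grid.length) :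
    ((gA1 grid).getD i []).length = (grid.headD []).length := by
  unfold gA1; rw [writes_rowlen, rowlen_gA0 grid i hi]
theorem length_gA2 (grid : List (List Int)) : (gA2 grid).length = grid.length := by
  unfold gA2; rw [writes_length, length_gA1]
theorem rowlen_gA2 (grid : List (List Int)) (i : Nat) (hi : i < grid.length) :
    ((gA2 grid).getD i []).length = (grid.headD []).length := by
  unfold gA2; rw [writes_rowlen, rowlen_gA1 grid i hi]
theorem length_gA3 (grid : List (List Int)) : (gA3 grid).length = grid.length := by
  unfold gA3; rw [writes_length, length_gA2]
theorem rowlen_gA3 (grid : List (List Int)) (i : Nat) (hi : i < grid.length) :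
    ((gA3 grid).getD i []).length = (grid.headD []).length := by
  unfold gA3; rw [writes_rowlen, rowlen_gA2 grid i hi]

theorem length_flatA (grid : List (List Int)) :
    (flatA grid).length = grid.length := by
  unfold flatA
  rw [writes_length, length_gA3]

theorem rowlen_flatA (grid : List (List Int)) (i : Nat) (hi : i < grid.length) :
    ((flatA grid).getD i []).length = (grid.headD []).length := by
  unfold flatA
  rw [writes_rowlen, rowlen_gA3 grid i hi]

-- closed forms of the four passes' write conditions at a fixed in-bounds cell (i, j)
theorem E1_iff (grid : List (List Int)) (i j : Nat)
    (hi : i < grid.length) (hj : j < (grid.headD []).length) :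
    (∃ p ∈ pairs (List.range' 1 (grid.length - 1)) (List.range (grid.headD []).length),
        getCell grid p.1 p.2 = 4 ∧ (p.1 - 1, p.2) = (i, j)) ↔
      (i + 1 < grid.length ∧ getCell grid (i + 1) j = 4) := by
  constructor
  · rintro ⟨⟨a, b⟩, hm, h4, he⟩
    rw [mem_pairs] at hm
    simp only [List.mem_range'_1, List.mem_range] at hm
    injection he with e1 e2
    have ha : a = i + 1 := by omega
    have hb : b = j := by omega
    subst ha; subst hb
    exact ⟨by omega, h4⟩
  · rintro ⟨h1, h4⟩
    refine ⟨(i + 1, j), ?_, h4, ?_⟩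
    · rw [mem_pairs]
      exact ⟨List.mem_range'_1.mpr (by omega), List.mem_range.mpr (by omega)⟩
    · simp

theorem E2_iff (grid : List (List Int)) (i j : Nat)
    (hi : i < grid.length) (hj : j < (grid.headD []).length) :
    (∃ p ∈ pairs (List.range grid.length) ((List.range ((grid.headD []).length - 1)).reverse),
        getCell grid p.1 p.2 = 4 ∧ (p.1, p.2 + 1) = (i, j)) ↔
      (1 ≤ j ∧ getCell grid i (j - 1) = 4) := by
  constructor
  · rintro ⟨⟨a, b⟩, hm, h4, he⟩
    rw [mem_pairs] at hm
    simp only [List.mem_reverse, List.mem_range] at hm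
    injection he with e1 e2
    have ha : a = i := by omega
    have hb : b = j - 1 := by omega
    subst ha; subst hb
    exact ⟨by omega, h4⟩
  · rintro ⟨h1, h4⟩
    refine ⟨(i, j - 1), ?_, h4, ?_⟩
    · rw [mem_pairs]
      exact ⟨List.mem_range.mpr (by omega),
        List.mem_reverse.mpr (List.mem_range.mpr (by omega))⟩
    · have : j - 1 + 1 = j := by omega
      rw [this]

theorem E3_iff (grid : List (List Int)) (i j : Nat)
    (hi : i < grid.length) (hj : j < (grid.headD []).length) :
    (∃ p ∈ pairs ((List.range (grid.length - 1)).reverse) (List.range (grid.headD []).length),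
        getCell grid p.1 p.2 = 4 ∧ (p.1 + 1, p.2) = (i, j)) ↔
      (1 ≤ i ∧ getCell grid (i - 1) j = 4) := by
  constructor
  · rintro ⟨⟨a, b⟩, hm, h4, he⟩
    rw [mem_pairs] at hm
    simp only [List.mem_reverse, List.mem_range] at hm
    injection he with e1 e2
    have ha : a = i - 1 := by omega
    have hb : b = j := by omega
    subst hb
    exact ⟨by omega, by rw [← ha]; exact h4⟩
  · rintro ⟨h1, h4⟩
    refine ⟨(i - 1, j), ?_, h4, ?_⟩
    · rw [mem_pairs]
      exact ⟨List.mem_reverse.mpr (List.mem_range.mpr (by omega)),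
        List.mem_range.mpr (by omega)⟩
    · have : i - 1 + 1 = i := by omega
      rw [this]

theorem E4_iff (grid : List (List Int)) (i j : Nat)
    (hi : i < grid.length) (hj : j < (grid.headD []).length) :
    (∃ p ∈ pairs (List.range grid.length) (List.range' 1 ((grid.headD []).length - 1)),
        getCell grid p.1 p.2 = 4 ∧ (p.1, p.2 - 1) = (i, j)) ↔
      (j + 1 < (grid.headD []).length ∧ getCell grid i (j + 1) = 4) := by
  constructor
  · rintro ⟨⟨a, b⟩, hm, h4, he⟩
    rw [mem_pairs] at hm
    simp only [List.mem_range'_1, List.mem_range] at hm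
    injection he with e1 e2
    have ha : a = i := by omega
    have hb : b = j + 1 := by omega
    subst ha; subst hb
    exact ⟨by omega, h4⟩
  · rintro ⟨h1, h4⟩
    refine ⟨(i, j + 1), ?_, h4, ?_⟩
    · rw [mem_pairs]
      exact ⟨List.mem_range.mpr (by omega), List.mem_range'_1.mpr (by omega)⟩
    · simp

theorem getCell_gA0 (grid : List (List Int)) (hPre : Pre_growingColor4 grid)
    (i j : Nat) (hi : i < grid.length) (hj : j < (grid.headD []).length) :
    getCell (gA0 grid) i j = getCell grid i j := by
  unfold gA0
  rw [getCell_copies grid _ _ i j (by rw [length_res0]; exact hi)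
      (by rw [rowlen_res0 grid i hi]; exact hj), if_pos]
  rw [mem_pairsD]
  refine ⟨by simpa [List.mem_range] using hi, ?_⟩
  simp only [List.mem_range]
  rw [rowlen_rect grid hPre i hi]
  exact hj

theorem getCell_gA1 (grid : List (List Int)) (hPre : Pre_growingColor4 grid)
    (i j : Nat) (hi : i < grid.length) (hj : j < (grid.headD []).length) :
    getCell (gA1 grid) i j =
      if i + 1 < grid.length ∧ getCell grid (i + 1) j = 4 then 4
      else getCell grid i j := by
  unfold gA1
  rw [getCell_writes grid _ _ _ i j (by rw [length_gA0]; exact hi)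
      (by rw [rowlen_gA0 grid i hi]; exact hj),
    if_congr (E1_iff grid i j hi hj) rfl rfl, getCell_gA0 grid hPre i j hi hj]

theorem getCell_gA2 (grid : List (List Int)) (hPre : Pre_growingColor4 grid)
    (i j : Nat) (hi : i < grid.length) (hj : j < (grid.headD []).length) :
    getCell (gA2 grid) i j =
      if 1 ≤ j ∧ getCell grid i (j - 1) = 4 then 4
      else if i + 1 < grid.length ∧ getCell grid (i + 1) j = 4 then 4
      else getCell grid i j := by
  unfold gA2
  rw [getCell_writes grid _ _ _ i j (by rw [length_gA1]; exact hi)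
      (by rw [rowlen_gA1 grid i hi]; exact hj),
    if_congr (E2_iff grid i j hi hj) rfl rfl, getCell_gA1 grid hPre i j hi hj]

theorem getCell_gA3 (grid : List (List Int)) (hPre : Pre_growingColor4 grid)
    (i j : Nat) (hi : i < grid.length) (hj : j < (grid.headD []).length) :
    getCell (gA3 grid) i j =
      if 1 ≤ i ∧ getCell grid (i - 1) j = 4 then 4
      else if 1 ≤ j ∧ getCell grid i (j - 1) = 4 then 4
      else if i + 1 < grid.length ∧ getCell grid (i + 1) j = 4 then 4
      else getCell grid i j := by
  unfold gA3
  rw [getCell_writes grid _ _ _ i j (by rw [length_gA2]; exact hi)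
      (by rw [rowlen_gA2 grid i hi]; exact hj),
    if_congr (E3_iff grid i j hi hj) rfl rfl, getCell_gA2 grid hPre i j hi hj]

theorem ite_chain (a b c d : Prop) [Decidable a] [Decidable b] [Decidable c]
    [Decidable d] (x y : Int) :
    (if d then x else if c then x else if b then x else if a then x else y)
      = if a ∨ b ∨ c ∨ d then x else y := by
  split_ifs <;> tauto

-- the pointwise value of A's result on a rectangular grid
theorem getCell_flatA (grid : List (List Int)) (hPre : Pre_growingColor4 grid)
    (i j : Nat) (hi : i < grid.length) (hj : j < (grid.headD []).length) :
    getCell (flatA grid) i j =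
      if (i + 1 < grid.length ∧ getCell grid (i + 1) j = 4)
          ∨ (1 ≤ j ∧ getCell grid i (j - 1) = 4)
          ∨ (1 ≤ i ∧ getCell grid (i - 1) j = 4)
          ∨ (j + 1 < (grid.headD []).length ∧ getCell grid i (j + 1) = 4)
        then 4 else getCell grid i j := by
  have hiff := getCell_gA3 grid hPre i j hi hj
  unfold flatA
  rw [getCell_writes grid _ _ _ i j (by rw [length_gA3]; exact hi)
        (by rw [rowlen_gA3 grid i hi]; exact hj),
    if_congr (E4_iff grid i j hi hj) rfl rfl, hiff]
  exact ite_chain _ _ _ _ 4 (getCell grid i j)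

-- the pointwise value of B's result
theorem litB_iff (grid : List (List Int)) (i j : Nat)
    (hi : i < grid.length) (hj : j < (grid.headD []).length) :
    litB grid grid.length (grid.headD []).length i j = true ↔
      getCell grid i j = 4
        ∨ (1 ≤ i ∧ getCell grid (i - 1) j = 4)
        ∨ (i + 1 < grid.length ∧ getCell grid (i + 1) j = 4)
        ∨ (1 ≤ j ∧ getCell grid i (j - 1) = 4)
        ∨ (j + 1 < (grid.headD []).length ∧ getCell grid i (j + 1) = 4) := by
  simp only [litB, List.any_cons, List.any_nil, Bool.or_false, Bool.or_eq_true,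
    Bool.and_eq_true, decide_eq_true_eq, beq_iff_eq]
  constructor
  · rintro (h0 | ⟨⟨⟨⟨ha, hb⟩, hc⟩, hd⟩, h4⟩ | ⟨⟨⟨⟨ha, hb⟩, hc⟩, hd⟩, h4⟩ |
      ⟨⟨⟨⟨ha, hb⟩, hc⟩, hd⟩, h4⟩ | ⟨⟨⟨⟨ha, hb⟩, hc⟩, hd⟩, h4⟩)
    · exact Or.inl h0
    · refine Or.inr (Or.inl ⟨by omega, ?_⟩)
      have e1 : ((i : Int) - 1).toNat = i - 1 := by omega
      have e2 : ((j : Int)).toNat = j := by omega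
      rwa [e1, e2] at h4
    · refine Or.inr (Or.inr (Or.inl ⟨by omega, ?_⟩))
      have e1 : ((i : Int) + 1).toNat = i + 1 := by omega
      have e2 : ((j : Int)).toNat = j := by omega
      rwa [e1, e2] at h4
    · refine Or.inr (Or.inr (Or.inr (Or.inl ⟨by omega, ?_⟩)))
      have e1 : ((i : Int)).toNat = i := by omega
      have e2 : ((j : Int) - 1).toNat = j - 1 := by omega
      rwa [e1, e2] at h4
    · refine Or.inr (Or.inr (Or.inr (Or.inr ⟨by omega, ?_⟩)))
      have e1 : ((i : Int)).toNat = i := by omega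
      have e2 : ((j : Int) + 1).toNat = j + 1 := by omega
      rwa [e1, e2] at h4
  · rintro (h0 | ⟨h1, h4⟩ | ⟨h1, h4⟩ | ⟨h1, h4⟩ | ⟨h1, h4⟩)
    · exact Or.inl h0
    · refine Or.inr (Or.inl ⟨⟨⟨⟨by omega, by omega⟩, by omega⟩, by omega⟩, ?_⟩)
      have e1 : ((i : Int) - 1).toNat = i - 1 := by omega
      have e2 : ((j : Int)).toNat = j := by omega
      rwa [e1, e2]
    · refine Or.inr (Or.inr (Or.inl ⟨⟨⟨⟨by omega, by omega⟩, by omega⟩, by omega⟩, ?_⟩))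
      have e1 : ((i : Int) + 1).toNat = i + 1 := by omega
      have e2 : ((j : Int)).toNat = j := by omega
      rwa [e1, e2]
    · refine Or.inr (Or.inr (Or.inr (Or.inl ⟨⟨⟨⟨by omega, by omega⟩, by omega⟩, by omega⟩, ?_⟩)))
      have e1 : ((i : Int)).toNat = i := by omega
      have e2 : ((j : Int) - 1).toNat = j - 1 := by omega
      rwa [e1, e2]
    · refine Or.inr (Or.inr (Or.inr (Or.inr ⟨⟨⟨⟨by omega, by omega⟩, by omega⟩, by omega⟩, ?_⟩)))
      have e1 : ((i : Int)).toNat = i := by omega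
      have e2 : ((j : Int) + 1).toNat = j + 1 := by omega
      rwa [e1, e2]

-- shape of B's result
theorem length_alt (grid : List (List Int)) :
    (growingColor4_alt grid).length = grid.length := by
  simp [growingColor4_alt]

-- the final assembly: A's grid and B's grid agree cell by cell
theorem main_eq (grid : List (List Int)) (hPre : Pre_growingColor4 grid) :
    growingColor4 grid = growingColor4_alt grid := by
  rw [A_flat]
  apply List.ext_getElem
  · rw [length_flatA, length_alt]
  · intro i h1 h2
    have hi : i < grid.length := by rwa [length_flatA] at h1
    have hrowA : ((flatA grid)[i]).length = (grid.headD []).length := by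
      rw [← List.getD_eq_getElem (flatA grid) [] h1]
      exact rowlen_flatA grid i hi
    have haltrow : (growingColor4_alt grid)[i] =
        (List.range (grid.headD []).length).map (fun j =>
          if litB grid grid.length (grid.headD []).length i j then 4
          else getCell grid i j) := by
      simp [growingColor4_alt]
    apply List.ext_getElem
    · rw [hrowA, haltrow]
      simp
    · intro j hj1 hj2
      have hjw : j < (grid.headD []).length := by rwa [hrowA] at hj1
      have hcell : (flatA grid)[i][j] = getCell (flatA grid) i j := by
        rw [getCell, List.getD_eq_getElem (flatA grid) [] h1,
          List.getD_eq_getElem ((flatA grid)[i]) 0 hj1]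
      rw [hcell, getCell_flatA grid hPre i j hi hjw]
      have hrhs : (growingColor4_alt grid)[i][j] =
          (if litB grid grid.length (grid.headD []).length i j then 4
           else getCell grid i j) := by
        simp [growingColor4_alt]
      rw [hrhs]
      have hB := litB_iff grid i j hi hjw
      by_cases hc : getCell grid i j = 4
      · rw [if_pos (hB.mpr (Or.inl hc)), hc, ite_self]
      · by_cases hb : litB grid grid.length (grid.headD []).length i j = true
        · rw [if_pos hb, if_pos ?_]
          rcases hB.mp hb with h | h | h | h | h
          · exact absurd h hc
          · exact Or.inr (Or.inr (Or.inl h))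
          · exact Or.inl h
          · exact Or.inr (Or.inl h)
          · exact Or.inr (Or.inr (Or.inr h))
        · rw [if_neg hb, if_neg ?_]
          intro h
          refine hb (hB.mpr ?_)
          rcases h with h | h | h | h
          · exact Or.inr (Or.inr (Or.inl h))
          · exact Or.inr (Or.inr (Or.inr (Or.inl h)))
          · exact Or.inr (Or.inl h)
          · exact Or.inr (Or.inr (Or.inr (Or.inr h)))

-- ===== VERDICT (by name: the statement is the Claim_ definition above) =====
theorem growingColor4_spec : Claim_equal_growingColor4 := by
  intro grid _ hPre
  unfold Spec_growingColor4
  exact main_eq grid hPre
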